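-- pv_equiv track=rewrite | github.com/harrylyx/newt | src/newt/reporting/builders/group_metrics.py | _resolve_score_model_columns
-- ===== SOURCE A (Python) =====
-- from typing import Dict, List, Optional, Sequence, Tuple
--
-- def _resolve_score_model_columns(
--     primary_score_name: str,
--     score_list: Sequence[str],
--     report_score_columns: Dict[str, str],
-- ) -> List[Tuple[str, str]]:
--     pairs: List[Tuple[str, str]] = []
--     for score_name in [primary_score_name, *score_list]:
--         report_column = report_score_columns.get(score_name)
--         if report_column and score_name not in {name for name, _ in pairs}:
--             pairs.append((score_name, report_column))
--     return pairs
-- ===== SOURCE B (Python) =====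
-- def _resolve_score_model_columns(
--     primary_score_name,
--     score_list,
--     report_score_columns,
-- ):
--     pairs = []
--     pending = [primary_score_name, *score_list]
--     while pending:
--         head = pending[0]
--         pending = [n for n in pending[1:] if n != head]
--         col = report_score_columns.get(head)
--         if col:
--             pairs.append((head, col))
--     return pairs
-- ===== Notes on version B (the rewrite author's own statement) =====
-- stated objective: alternative
-- what changed: Replaces A's single pass with a seen-set membership test by a shrinking-worklist loop that deduplicates by deleting all later occurrences of the current head from the pending list before continuing, appending the head's pair when its column is truthy.
import Mathlib
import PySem

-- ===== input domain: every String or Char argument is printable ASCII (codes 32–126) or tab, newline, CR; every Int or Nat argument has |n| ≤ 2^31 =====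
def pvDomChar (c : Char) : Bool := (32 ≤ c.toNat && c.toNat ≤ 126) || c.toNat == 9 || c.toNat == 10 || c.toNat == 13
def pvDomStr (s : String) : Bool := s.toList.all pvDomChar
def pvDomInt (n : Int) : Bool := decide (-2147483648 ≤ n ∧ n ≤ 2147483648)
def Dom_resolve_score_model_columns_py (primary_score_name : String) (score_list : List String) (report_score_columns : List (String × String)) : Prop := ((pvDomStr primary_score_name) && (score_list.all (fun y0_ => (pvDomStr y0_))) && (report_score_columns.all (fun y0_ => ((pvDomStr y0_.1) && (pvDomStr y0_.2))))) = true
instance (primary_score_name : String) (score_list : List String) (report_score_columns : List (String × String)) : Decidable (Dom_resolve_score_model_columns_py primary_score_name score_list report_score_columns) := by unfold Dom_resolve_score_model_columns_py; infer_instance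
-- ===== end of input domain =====

-- B replaces A's single loop (seen-set membership test while appending) by a shrinking-worklist
-- loop that deduplicates by deleting later occurrences of the head from the pending list.


-- ===== PORT A =====
-- one loop: for each name, dict .get, truthiness test on the column, membership test on the set of
-- names already paired, append
def resolve_score_model_columns_py (primary_score_name : String) (score_list : List String) (report_score_columns : List (String × String)) : List (String × String) :=
  (primary_score_name :: score_list).foldl
    (fun pairs score_name =>
      match (PySem.Dict.mk report_score_columns).get? score_name with
      | none => pairs
      | some report_column =>
          if report_column ≠ "" ∧
             ¬ PySem.Set.contains (PySem.Set.ofList (pairs.map Prod.fst)) score_name = true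
          then pairs ++ [(score_name, report_column)]
          else pairs)
    []

-- ===== PORT B =====
-- while loop over a shrinking worklist: take the head, delete its later occurrences from the
-- pending list, append the head's pair when its column is truthy
def pvLoopB (rsc : List (String × String)) (pairs : List (String × String)) : List String → List (String × String)
  | [] => pairs
  | head :: t =>
      let pending := t.filter (fun n => n ≠ head)
      match (PySem.Dict.mk rsc).get? head with
      | none => pvLoopB rsc pairs pending
      | some col =>
          if col ≠ "" then pvLoopB rsc (pairs ++ [(head, col)]) pending
          else pvLoopB rsc pairs pending
termination_by ns => ns.length
decreasing_by all_goals simpa using Nat.lt_succ_of_le ((List.length_filter_le _ _).trans (by simp))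

def resolve_score_model_columns_py_alt (primary_score_name : String) (score_list : List String) (report_score_columns : List (String × String)) : List (String × String) :=
  pvLoopB report_score_columns [] (primary_score_name :: score_list)

-- ===== PRECONDITION & SPEC =====
def Spec_resolve_score_model_columns_py (primary_score_name : String) (score_list : List String) (report_score_columns : List (String × String)) (out : List (String × String)) : Prop := out = resolve_score_model_columns_py_alt primary_score_name score_list report_score_columns
instance (primary_score_name : String) (score_list : List String) (report_score_columns : List (String × String)) (out : List (String × String)) : Decidable (Spec_resolve_score_model_columns_py primary_score_name score_list report_score_columns out) := by unfold Spec_resolve_score_model_columns_py; infer_instance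

-- ===== CLAIM (what is proved, stated in full; the proofs are below) =====
def Claim_equal_resolve_score_model_columns_py : Prop := ∀ (primary_score_name : String) (score_list : List String) (report_score_columns : List (String × String)), Dom_resolve_score_model_columns_py primary_score_name score_list report_score_columns → Spec_resolve_score_model_columns_py primary_score_name score_list report_score_columns (resolve_score_model_columns_py primary_score_name score_list report_score_columns)

-- ===== LEMMAS AND PROOFS =====

-- the per-name pairing function shared by the reasoning below
def pvPair (rsc : List (String × String)) (n : String) : Option (String × String) :=
  match (PySem.Dict.mk rsc).get? n with
  | none => none
  | some c => if c ≠ "" then some (n, c) else none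

-- the first components of filterMap pvPair are the names on which pvPair fires
lemma map_fst_filterMap_pvPair (rsc : List (String × String)) (acc : List String) :
    (acc.filterMap (pvPair rsc)).map Prod.fst = acc.filter (fun n => (pvPair rsc n).isSome) := by
  induction acc with
  | nil => rfl
  | cons a t ih =>
      simp only [List.filterMap_cons, List.filter_cons]
      cases h : pvPair rsc a with
      | none => simpa [h] using ih
      | some p =>
          have hfst : p.1 = a := by
            unfold pvPair at h
            cases hg : (PySem.Dict.mk rsc).get? a with
            | none => simp [hg] at h
            | some c =>
                simp only [hg] at h
                by_cases hc : c ≠ "" <;> simp [hc] at h <;> simp [← h]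
          simp [List.map_cons, hfst, ih]

-- loop invariant: running A's fold on filterMap pvPair acc over names yields
-- filterMap pvPair of B's seen-set fold
lemma foldA_invariant (rsc : List (String × String)) (names : List String) :
    ∀ acc : List String,
      names.foldl
        (fun pairs score_name =>
          match (PySem.Dict.mk rsc).get? score_name with
          | none => pairs
          | some report_column =>
              if report_column ≠ "" ∧
                 ¬ PySem.Set.contains (PySem.Set.ofList (pairs.map Prod.fst)) score_name = true
              then pairs ++ [(score_name, report_column)]
              else pairs)
        (acc.filterMap (pvPair rsc))
      = (names.foldl PySem.Set.add acc).filterMap (pvPair rsc) := by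
  induction names with
  | nil => intro acc; rfl
  | cons m rest ih =>
      intro acc
      have hmem : PySem.Set.contains
          (PySem.Set.ofList ((acc.filterMap (pvPair rsc)).map Prod.fst)) m = true
          ↔ (m ∈ acc ∧ (pvPair rsc m).isSome) := by
        rw [map_fst_filterMap_pvPair]
        simp [PySem.Set.contains, PySem.Set.mem_ofList, List.mem_filter]
      have hstep :
          (match (PySem.Dict.mk rsc).get? m with
           | none => acc.filterMap (pvPair rsc)
           | some report_column =>
               if report_column ≠ "" ∧
                  ¬ PySem.Set.contains
                      (PySem.Set.ofList ((acc.filterMap (pvPair rsc)).map Prod.fst)) m = true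
               then acc.filterMap (pvPair rsc) ++ [(m, report_column)]
               else acc.filterMap (pvPair rsc))
          = (PySem.Set.add acc m).filterMap (pvPair rsc) := by
        have hadd : PySem.Set.add acc m = if m ∈ acc then acc else acc ++ [m] := by
          simp [PySem.Set.add, PySem.Set.contains]
        cases hg : (PySem.Dict.mk rsc).get? m with
        | none =>
            have hp : pvPair rsc m = none := by unfold pvPair; simp [hg]
            by_cases hin : m ∈ acc <;> simp [hin, List.filterMap_append, hp]
        | some c =>
            have hp : pvPair rsc m = if c ≠ "" then some (m, c) else none := by
              unfold pvPair; simp [hg]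
            by_cases hc : c ≠ ""
            · by_cases hin : m ∈ acc
              · have hct : PySem.Set.contains
                    (PySem.Set.ofList ((acc.filterMap (pvPair rsc)).map Prod.fst)) m = true := by
                  rw [hmem]; exact ⟨hin, by simp [hp, hc]⟩
                rw [hadd, if_pos hin]
                exact if_neg (fun h => h.2 hct)
              · have hct : ¬ PySem.Set.contains
                    (PySem.Set.ofList ((acc.filterMap (pvPair rsc)).map Prod.fst)) m = true := by
                  rw [hmem]; exact fun h => hin h.1
                rw [hadd, if_neg hin, List.filterMap_append]
                exact (if_pos ⟨hc, hct⟩).trans (by simp [hp, hc])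
            · have hp' : pvPair rsc m = none := by simp [hp, hc]
              by_cases hin : m ∈ acc <;> simp [hc, hin, List.filterMap_append, hp']
      simp only [List.foldl_cons, hstep]
      exact ih (PySem.Set.add acc m)

-- ofList commutes with filter
lemma ofList_filter (p : String → Bool) (xs : List String) :
    (PySem.Set.ofList xs).filter p = PySem.Set.ofList (xs.filter p) := by
  induction xs with
  | nil => rfl
  | cons x t ih =>
      by_cases hp : p x = true
      · rw [List.filter_cons_of_pos hp, PySem.Set.ofList_cons, PySem.Set.ofList_cons,
          PySem.Set.discard, PySem.Set.discard, List.filter_cons_of_pos hp, ← ih,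
          List.filter_filter, List.filter_filter]
        congr 1
        exact List.filter_congr (fun a _ => Bool.and_comm _ _)
      · have hpx : p x = false := by simpa using hp
        rw [List.filter_cons_of_neg (by simp [hpx]), PySem.Set.ofList_cons, PySem.Set.discard,
          List.filter_cons_of_neg (by simp [hpx]), ← ih, List.filter_filter]
        exact List.filter_congr (fun a _ => by
          by_cases h : a = x
          · subst h; simp [hpx]
          · simp [h])

-- B's worklist loop computes acc ++ filterMap pvPair of the order-preserving dedup
lemma loopB_eq_filterMap_ofList (rsc : List (String × String)) (names : List String) :
    ∀ acc, pvLoopB rsc acc names = acc ++ (PySem.Set.ofList names).filterMap (pvPair rsc) := by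
  suffices h : ∀ (k : Nat) (ns : List String), ns.length ≤ k → ∀ acc,
      pvLoopB rsc acc ns = acc ++ (PySem.Set.ofList ns).filterMap (pvPair rsc) from
    fun acc => h names.length names le_rfl acc
  intro k
  induction k with
  | zero =>
      intro ns hns acc
      have : ns = [] := List.eq_nil_of_length_eq_zero (Nat.le_zero.mp hns)
      subst this; simp [pvLoopB]
  | succ k ih =>
      intro ns hns
      cases ns with
      | nil => intro acc; simp [pvLoopB]
      | cons head t =>
          intro acc
          have hrest : (t.filter (fun n => n ≠ head)).length ≤ k := by
            have := List.length_filter_le (fun n => decide (n ≠ head)) t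
            simpa using Nat.le_trans this (Nat.lt_succ_iff.mp (by simpa using hns))
          have hfil : (PySem.Set.ofList t).filter (fun y => !y == head)
              = PySem.Set.ofList (t.filter (fun n => n ≠ head)) := by
            rw [ofList_filter]
            congr 1
            exact List.filter_congr (fun a _ => by by_cases h : a = head <;> simp [h])
          rw [PySem.Set.ofList_cons, List.filterMap_cons, PySem.Set.discard, hfil]
          simp only [pvLoopB]
          cases hg : (PySem.Dict.mk rsc).get? head with
          | none =>
              have hp : pvPair rsc head = none := by unfold pvPair; simp [hg]
              simp only [hp]
              simpa using ih _ (by simpa using hrest) acc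
          | some col =>
              have hp : pvPair rsc head = if col ≠ "" then some (head, col) else none := by
                unfold pvPair; simp [hg]
              by_cases hc : col ≠ ""
              · simp only [hp]
                split_ifs
                rw [ih _ (by simpa using hrest) (acc ++ [(head, col)])]
                simp
              · simp only [hp, hc, if_false]
                simpa [hc] using ih _ (by simpa using hrest) acc

-- ===== VERDICT (by name: the statement is the Claim_ definition above) =====
theorem resolve_score_model_columns_py_spec : Claim_equal_resolve_score_model_columns_py := by
  intro p sl rsc _
  unfold Spec_resolve_score_model_columns_py
  unfold resolve_score_model_columns_py resolve_score_model_columns_py_alt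
  have h := foldA_invariant rsc (p :: sl) []
  simp only [List.filterMap_nil] at h
  rw [h, loopB_eq_filterMap_ofList rsc (p :: sl) [], PySem.Set.ofList_eq_foldl]
  simp
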